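-- pv_equiv track=rewrite | github.com/wild0reZ/Progetto-Tesi | main.py | allThePermsRotation
-- ===== SOURCE A (Python) =====
-- import itertools
--
-- def rotate(l, n):
--     return l[n:] + l[:n]
--
-- def allThePermsRotation(data):
--     listOfAllRotations = []
--     allRotationsCartesianProduct = []
--     for sublist in data:
--         allThePerms = []
--         for i in range(len(sublist)):
--             allThePerms.append(rotate(sublist, i))
--         listOfAllRotations.append(allThePerms)
--     for data in itertools.product(*listOfAllRotations):
--         allRotationsCartesianProduct.append(data)
--     return allRotationsCartesianProduct
-- ===== SOURCE B (Python) =====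
-- def allThePermsRotation(data):
--     lens = [len(s) for s in data]
--     total = 1
--     for L in lens:
--         total *= L
--     out = []
--     for k in range(total):
--         parts = []
--         rem = k
--         for s, L in zip(reversed(data), reversed(lens)):
--             rem, d = divmod(rem, L)
--             parts.append(s[d:] + s[:d])
--         out.append(tuple(reversed(parts)))
--     return out
-- ===== Notes on version B (the rewrite author's own statement) =====
-- stated objective: alternative
-- what changed: Replaces pool-building plus itertools.product by mixed-radix index decoding: B multiplies the sublist lengths into a total count and, for each k in range(total), decodes k with divmod into one tuple of rotations computed on the fly, never materialising the rotation pools or the product recursion.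
import Mathlib
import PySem

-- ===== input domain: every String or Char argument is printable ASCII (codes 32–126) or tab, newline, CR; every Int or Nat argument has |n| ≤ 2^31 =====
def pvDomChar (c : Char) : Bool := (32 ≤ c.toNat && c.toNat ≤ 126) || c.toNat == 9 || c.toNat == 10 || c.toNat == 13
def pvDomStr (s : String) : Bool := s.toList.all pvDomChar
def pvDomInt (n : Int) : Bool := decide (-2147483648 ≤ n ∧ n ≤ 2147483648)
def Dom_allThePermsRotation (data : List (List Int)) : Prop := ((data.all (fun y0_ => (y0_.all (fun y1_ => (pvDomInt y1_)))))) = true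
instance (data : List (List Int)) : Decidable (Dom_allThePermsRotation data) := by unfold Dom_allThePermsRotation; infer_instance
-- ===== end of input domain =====

-- B replaces A's pool-building + itertools.product by mixed-radix index decoding: it
-- multiplies the sublist lengths into a total count and, for each index k in range(total),
-- decodes k digit by digit (divmod) into one tuple of rotations built on the fly,
-- never materialising the rotation pools or the product recursion (objective: alternative).

-- ===== PORT A =====
-- rotate(l, n) = l[n:] + l[:n]
def rotate (l : List Int) (n : Int) : List Int :=
  PySem.List.slice l (some n) none ++ PySem.List.slice l none (some n)

-- itertools.product(*pools), leftmost factor varying slowest (tuples as lists)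
def pyProduct (pools : List (List (List Int))) : List (List (List Int)) :=
  match pools with
  | [] => [[]]
  | p :: rest => p.flatMap (fun x => (pyProduct rest).map (fun t => x :: t))

def allThePermsRotation (data : List (List Int)) : List (List (List Int)) :=
  let listOfAllRotations :=
    data.foldl (fun acc sublist =>
      acc ++ [(List.range sublist.length).foldl
                (fun perms (i : Nat) => perms ++ [rotate sublist (i : Int)]) []]) []
  (pyProduct listOfAllRotations).foldl (fun acc t => acc ++ [t]) []

-- ===== PORT B =====
-- s[d:] + s[:d]
def rotB (s : List Int) (d : Int) : List Int :=
  PySem.List.slice s (some d) none ++ PySem.List.slice s none (some d)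

-- one step of B's inner loop: rem, d = divmod(rem, L); parts.append(s[d:] + s[:d])
def stepB (st : Int × List (List Int)) (p : List Int × Int) : Int × List (List Int) :=
  (PySem.Int.floordiv st.1 p.2, st.2 ++ [rotB p.1 (PySem.Int.mod st.1 p.2)])

def allThePermsRotation_alt (data : List (List Int)) : List (List (List Int)) :=
  let lens := data.map (fun s => (s.length : Int))
  let total := lens.foldl (· * ·) 1
  (PySem.List.pyRange 0 total 1).foldl
    (fun out k =>
      out ++ [(((data.reverse.zip lens.reverse).foldl stepB (k, [])).2).reverse]) []

-- ===== PRECONDITION & SPEC =====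
def Spec_allThePermsRotation (data : List (List Int)) (out : List (List (List Int))) : Prop := out = allThePermsRotation_alt data
instance (data : List (List Int)) (out : List (List (List Int))) : Decidable (Spec_allThePermsRotation data out) := by unfold Spec_allThePermsRotation; infer_instance

-- ===== CLAIM (what is proved, stated in full; the proofs are below) =====
def Claim_equal_allThePermsRotation : Prop := ∀ (data : List (List Int)), Dom_allThePermsRotation data → Spec_allThePermsRotation data (allThePermsRotation data)

-- ===== LEMMAS AND PROOFS =====

-- A's pool of rotations for one sublist
def poolA (s : List Int) : List (List Int) :=
  (List.range s.length).map (fun (i : Nat) => rotate s (i : Int))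

-- product of the sublist lengths, on the Nat side
def pn (data : List (List Int)) : Nat := (data.map List.length).prod

-- B's inner decoding fold, rewritten as a foldr over the unreversed pair list
def decF (data : List (List Int)) (k : Int) : Int × List (List Int) :=
  (data.zip (data.map (fun s => (s.length : Int)))).foldr (fun p st => stepB st p) (k, [])

lemma zip_rev {α β : Type} : ∀ (xs : List α) (ys : List β), xs.length = ys.length →
    xs.reverse.zip ys.reverse = (xs.zip ys).reverse := by
  intro xs
  induction xs with
  | nil => intro ys h; cases ys <;> simp_all
  | cons a xs ih =>
      intro ys h
      cases ys with
      | nil => simp at h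
      | cons b ys =>
          simp only [List.length_cons, Nat.add_right_cancel_iff] at h
          simp only [List.reverse_cons]
          rw [List.zip_append (by simpa using h), ih ys h]
          simp

lemma decF_eq_fold (data : List (List Int)) (k : Int) :
    ((data.reverse.zip ((data.map (fun s => (s.length : Int))).reverse)).foldl stepB (k, []))
      = decF data k := by
  rw [zip_rev data _ (by simp), List.foldl_reverse]; rfl

lemma pn_cons (s : List Int) (rest : List (List Int)) :
    pn (s :: rest) = s.length * pn rest := by
  simp [pn]

lemma decF_cons (s : List Int) (rest : List (List Int)) (k : Int) :
    decF (s :: rest) k = stepB (decF rest k) (s, (s.length : Int)) := by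
  simp [decF]

-- the quotient/remainder invariant of the decoding fold
lemma decF_split (data : List (List Int)) (k : Nat) :
    decF data (k : Int) = (((k / pn data : Nat) : Int), (decF data ((k % pn data : Nat) : Int)).2) := by
  induction data generalizing k with
  | nil => simp [decF, pn]
  | cons s rest ih =>
      rw [decF_cons, decF_cons, ih k, ih (k % pn (s :: rest))]
      simp only [stepB, pn_cons, PySem.Int.floordiv_natCast, PySem.Int.mod_natCast]
      refine Prod.ext ?_ ?_
      · show ((k / pn rest / s.length : Nat) : Int) = ((k / (s.length * pn rest) : Nat) : Int)
        rw [Nat.div_div_eq_div_mul, mul_comm]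
      · show _ ++ [rotB s ((k / pn rest % s.length : Nat) : Int)]
            = _ ++ [rotB s ((k % (s.length * pn rest) / pn rest % s.length : Nat) : Int)]
        rw [Nat.mod_mod_of_dvd k ⟨s.length, mul_comm _ _⟩, mul_comm s.length,
          Nat.mod_mul_right_div_self, Nat.mod_mod_of_dvd _ dvd_rfl]

-- List.range over a product splits into blocks
lemma range_mul (a b : Nat) :
    List.range (a * b) = (List.range a).flatMap (fun d => (List.range b).map (fun r => d * b + r)) := by
  induction a with
  | zero => simp
  | succ a ih =>
      rw [Nat.succ_mul, List.range_add, ih]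
      simp [List.range_succ, mul_comm]

-- main lemma: the decoded indices enumerate the Cartesian product of the pools
lemma decode_enum (data : List (List Int)) :
    (List.range (pn data)).map (fun (k : Nat) => ((decF data (k : Int)).2).reverse)
      = pyProduct (data.map poolA) := by
  induction data with
  | nil => simp [decF, pn, pyProduct]
  | cons s rest ih =>
      rw [pn_cons, range_mul, List.map_flatMap]
      simp only [List.map_cons, pyProduct, ← ih, poolA, List.flatMap_map, List.map_map]
      refine List.flatMap_congr ?_
      intro d hd
      rw [List.mem_range] at hd
      refine List.map_congr_left ?_
      intro r hr
      rw [List.mem_range] at hr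
      have hq : (d * pn rest + r) / pn rest = d := by
        rw [mul_comm, Nat.mul_add_div (by omega), Nat.div_eq_of_lt hr]; omega
      have hm : (d * pn rest + r) % pn rest = r := by
        rw [mul_comm, Nat.mul_add_mod, Nat.mod_eq_of_lt hr]
      simp only [Function.comp_apply]
      rw [decF_cons, decF_split rest, hq, hm]
      simp [stepB, PySem.Int.mod_natCast, Nat.mod_eq_of_lt hd, rotB, rotate]

lemma total_eq (data : List (List Int)) :
    (data.map (fun s => (s.length : Int))).foldl (· * ·) 1 = ((pn data : Nat) : Int) := by
  rw [← List.prod_eq_foldl, pn, Nat.cast_list_prod, List.map_map]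
  rfl

-- ===== VERDICT (by name: the statement is the Claim_ definition above) =====
theorem allThePermsRotation_spec : Claim_equal_allThePermsRotation := by
  intro data _
  show allThePermsRotation data = allThePermsRotation_alt data
  unfold allThePermsRotation allThePermsRotation_alt
  simp only [PySem.List.foldl_append_singleton_eq_map, List.nil_append, total_eq,
    PySem.List.pyRange_zero_nat, List.map_map]
  rw [show (fun (x : List Int) => List.map (fun (i : Nat) => rotate x (i : Int)) (List.range x.length)) = poolA from rfl,
      List.map_id', ← decode_enum]
  refine List.map_congr_left ?_
  intro k _
  simp only [Function.comp_apply]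
  rw [decF_eq_fold]
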